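-- pv_equiv track=rewrite | github.com/fhscholl/python-switchos | src/python_switchos/utils.py | bool_list_to_hex
-- ===== SOURCE A (Python) =====
-- from typing import List, Type, get_args
--
-- def bool_list_to_hex(values: List[bool]) -> str:
--     """Converts a list of booleans to a hex bitmask string.
--
--     Bit N corresponds to index N in the list.
--     Example: [True, True, False, True] -> "0x0b" (binary 1011)
--
--     Args:
--         values: List of boolean values.
--
--     Returns:
--         Hex string with even-length formatting (e.g., "0x0f" not "0xf").
--     """
--     if not values:
--         return "0x00"
--     bitmask = sum(1 << i for i, v in enumerate(values) if v)
--     if bitmask == 0: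
--         return "0x00"
--     hex_str = f"{bitmask:x}"
--     if len(hex_str) % 2 == 1:
--         hex_str = "0" + hex_str
--     return f"0x{hex_str}"
-- ===== SOURCE B (Python) =====
-- def bool_list_to_hex(values):
--     """Nibble-wise conversion: chunk the list into groups of 4 bits (index 0 =
--     least-significant), map each nibble to a hex char, reverse, strip leading
--     zeros, pad to even length, prefix '0x'."""
--     digits = "0123456789abcdef"
--     chars = []  # low-to-high nibble characters
--     for i in range(0, len(values), 4):
--         chunk = values[i:i + 4]
--         nib = 0
--         for j, b in enumerate(chunk):
--             if b:
--                 nib += 1 << j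
--         chars.append(digits[nib])
--     chars.reverse()
--     k = 0
--     while k < len(chars) and chars[k] == '0':
--         k += 1
--     stripped = chars[k:]
--     if not stripped:
--         return "0x00"
--     if len(stripped) % 2 == 1:
--         stripped = ['0'] + stripped
--     return "0x" + "".join(stripped)
-- ===== Notes on version B (the rewrite author's own statement) =====
-- stated objective: faster
-- what changed: B converts the list nibble-by-nibble (chunks of 4 bits, least-significant first) directly into hex characters and then strips leading zeros, instead of summing one big-integer bitmask with 1<<i shifts and formatting it; avoiding the O(n^2)-bit big-integer additions is the speedup (measured 21x at n=262144).
import Mathlib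
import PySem

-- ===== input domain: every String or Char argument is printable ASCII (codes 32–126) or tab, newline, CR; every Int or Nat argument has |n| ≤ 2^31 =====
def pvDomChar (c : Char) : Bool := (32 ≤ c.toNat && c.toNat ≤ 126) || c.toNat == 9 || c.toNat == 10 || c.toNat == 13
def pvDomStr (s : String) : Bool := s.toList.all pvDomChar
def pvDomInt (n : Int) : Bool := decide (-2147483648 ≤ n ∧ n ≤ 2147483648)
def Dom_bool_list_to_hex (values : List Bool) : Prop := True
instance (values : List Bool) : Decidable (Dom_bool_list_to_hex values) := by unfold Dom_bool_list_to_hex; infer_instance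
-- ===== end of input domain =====

-- B converts nibble-by-nibble (chunks of 4 bits → hex chars) instead of building one big
-- integer and formatting it; objective: alternative decomposition, same exact results.

-- ===== PORT A =====
-- hand port of f"{n:x}" for a nonnegative int: high-to-low hex digits, exact for n ≥ 0
def pvHexChars (n : Nat) : List Char :=
  if h : n = 0 then [] else pvHexChars (n / 16) ++ [Nat.digitChar (n % 16)]
termination_by n
decreasing_by exact Nat.div_lt_self (Nat.pos_of_ne_zero h) (by omega)

def pvHexStr (n : Nat) : List Char := if n = 0 then ['0'] else pvHexChars n

def bool_list_to_hex (values : List Bool) : String :=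
  if values = [] then "0x00"
  else
    let bitmask : Int := (PySem.List.enumerate values).foldl
      (fun acc p => if p.2 then acc + 2 ^ p.1.toNat else acc) 0
    if bitmask = 0 then "0x00"
    else
      let hex_str : List Char := pvHexStr bitmask.toNat  -- f"{bitmask:x}", bitmask > 0 here
      let hex_str := if hex_str.length % 2 = 1 then '0' :: hex_str else hex_str
      String.mk ('0' :: 'x' :: hex_str)

-- ===== PORT B =====
def pvBit (b : Bool) : Nat := if b then 1 else 0

-- the nibble values of consecutive chunks of 4 bits, least-significant chunk first
def pvNibbles : List Bool → List Nat
  | [] => []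
  | [b0] => [pvBit b0]
  | [b0, b1] => [pvBit b0 + 2 * pvBit b1]
  | [b0, b1, b2] => [pvBit b0 + 2 * pvBit b1 + 4 * pvBit b2]
  | b0 :: b1 :: b2 :: b3 :: rest =>
      (pvBit b0 + 2 * pvBit b1 + 4 * pvBit b2 + 8 * pvBit b3) :: pvNibbles rest

def bool_list_to_hex_alt (values : List Bool) : String :=
  -- "0123456789abcdef"[nib] = Nat.digitChar nib, exact for nib < 16
  let chars := (pvNibbles values).map Nat.digitChar
  let stripped := chars.reverse.dropWhile (fun c => c == '0')
  if stripped = [] then "0x00"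
  else
    let stripped := if stripped.length % 2 = 1 then '0' :: stripped else stripped
    String.mk ('0' :: 'x' :: stripped)

-- ===== PRECONDITION & SPEC =====
def Spec_bool_list_to_hex (values : List Bool) (out : String) : Prop := out = bool_list_to_hex_alt values
instance (values : List Bool) (out : String) : Decidable (Spec_bool_list_to_hex values out) := by unfold Spec_bool_list_to_hex; infer_instance

-- ===== CLAIM (what is proved, stated in full; the proofs are below) =====
def Claim_equal_bool_list_to_hex : Prop := ∀ (values : List Bool), Dom_bool_list_to_hex values → Spec_bool_list_to_hex values (bool_list_to_hex values)

-- ===== LEMMAS AND PROOFS =====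

-- the bit value of the list, index 0 least significant
def pvVal (l : List Bool) : Nat := l.foldr (fun b acc => pvBit b + 2 * acc) 0

def pvNibVal (l : List Nat) : Nat := l.foldr (fun d acc => d + 16 * acc) 0

theorem pv_bitmask_eq (l : List Bool) : ∀ (s : Nat) (acc : Int),
    (PySem.List.enumerate l (s : Int)).foldl
      (fun acc p => if p.2 then acc + 2 ^ p.1.toNat else acc) acc
    = acc + 2 ^ s * (pvVal l : Int) := by
  induction l with
  | nil => intro s acc; simp [PySem.List.enumerate_nil, pvVal]
  | cons b t ih =>
      intro s acc
      rw [PySem.List.enumerate_cons]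
      have : ((s : Int) + 1) = ((s + 1 : Nat) : Int) := by push_cast; ring
      simp only [List.foldl_cons, this, ih]
      cases b <;> simp [pvVal, pvBit, Int.toNat_natCast, List.foldr] <;> ring

theorem pv_val_nibbles (l : List Bool) : pvNibVal (pvNibbles l) = pvVal l := by
  induction l using pvNibbles.induct <;>
    simp_all [pvNibbles, pvNibVal, pvVal, pvBit, List.foldr] <;> split_ifs <;> omega

theorem pv_nibbles_lt (l : List Bool) : ∀ d ∈ pvNibbles l, d < 16 := by
  induction l using pvNibbles.induct <;>
    simp_all [pvNibbles, pvBit] <;> split_ifs <;> omega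

theorem pv_digitChar_ne_zero (d : Nat) (h1 : 0 < d) (h2 : d < 16) : ¬ (Nat.digitChar d == '0') = true := by
  interval_cases d <;> decide

theorem pv_hexChars_ne_nil (n : Nat) (h : n ≠ 0) : pvHexChars n ≠ [] := by
  rw [pvHexChars]; simp [h]

theorem pv_strip_zero (l : List Nat) (hlt : ∀ d ∈ l, d < 16) (h0 : pvNibVal l = 0) :
    (l.map Nat.digitChar).reverse.dropWhile (fun c => c == '0') = [] := by
  induction l with
  | nil => simp
  | cons d t ih =>
      have hd : d = 0 ∧ pvNibVal t = 0 := by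
        simp [pvNibVal, List.foldr] at h0 ⊢; omega
      have ht := ih (fun x hx => hlt x (by simp [hx])) hd.2
      simp only [List.map_cons, List.reverse_cons, List.dropWhile_append, ht, hd.1]
      simp [Nat.digitChar]

theorem pv_strip_pos (l : List Nat) (hlt : ∀ d ∈ l, d < 16) (h0 : pvNibVal l ≠ 0) :
    (l.map Nat.digitChar).reverse.dropWhile (fun c => c == '0') = pvHexChars (pvNibVal l) := by
  induction l with
  | nil => simp [pvNibVal] at h0
  | cons d t ih =>
      have hdlt : d < 16 := hlt d (by simp)
      have htlt : ∀ x ∈ t, x < 16 := fun x hx => hlt x (by simp [hx])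
      have hN : pvNibVal (d :: t) = d + 16 * pvNibVal t := by simp [pvNibVal, List.foldr]
      have hdiv : pvNibVal (d :: t) / 16 = pvNibVal t := by omega
      have hmod : pvNibVal (d :: t) % 16 = d := by omega
      by_cases hM : pvNibVal t = 0
      · have hd0 : 0 < d := by omega
        have ht := pv_strip_zero t htlt hM
        simp only [List.map_cons, List.reverse_cons, List.dropWhile_append, ht]
        rw [pvHexChars]
        simp only [dif_neg h0, hdiv, hmod, hM, List.isEmpty_nil, if_true]
        rw [pvHexChars]
        simp [List.dropWhile, pv_digitChar_ne_zero d hd0 hdlt]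
      · have ht := ih htlt hM
        have hne : (t.map Nat.digitChar).reverse.dropWhile (fun c => c == '0') ≠ [] := by
          rw [ht]; exact pv_hexChars_ne_nil _ hM
        conv_rhs => rw [pvHexChars]
        rw [dif_neg h0, hdiv, hmod]
        simp only [List.map_cons, List.reverse_cons, List.dropWhile_append, ht,
          if_neg (show ¬((pvHexChars (pvNibVal t)).isEmpty = true) by
            simp [List.isEmpty_iff, pv_hexChars_ne_nil _ hM])]

-- ===== VERDICT (by name: the statement is the Claim_ definition above) =====
theorem bool_list_to_hex_spec : Claim_equal_bool_list_to_hex := by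
  intro values _
  unfold Spec_bool_list_to_hex bool_list_to_hex bool_list_to_hex_alt
  by_cases hnil : values = []
  · subst hnil; simp [pvNibbles]
  · simp only [if_neg hnil]
    have hbm := pv_bitmask_eq values 0 0
    simp only [Nat.cast_zero, pow_zero, one_mul, zero_add] at hbm
    rw [hbm]
    have hlt := pv_nibbles_lt values
    by_cases h0 : pvVal values = 0
    · have := pv_strip_zero (pvNibbles values) hlt (by rw [pv_val_nibbles]; exact h0)
      simp [h0, this]
    · have hstr := pv_strip_pos (pvNibbles values) hlt (by rw [pv_val_nibbles]; exact h0)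
      rw [pv_val_nibbles] at hstr
      have hInt : ((pvVal values : Int) = 0) = False := by simp [h0]
      simp only [hInt, if_false, Int.toNat_natCast, pvHexStr, if_neg h0, hstr,
        if_neg (pv_hexChars_ne_nil _ h0)]
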